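-- pv_equiv track=rewrite | github.com/apfirsov/practicum_algorithms | python/intern/b.py | calculate_rocket_time
-- ===== SOURCE A (Python) =====
-- def calculate_rocket_time(log):
--     log.sort()
--     rockets_time = {}
--     for timestamp, status, id in log:
--         if id not in rockets_time:
--             rockets_time[id] = (0, 0)
--         # Порядок гарантирвоан
--         if status == 'A':
--             rockets_time[id] = (rockets_time[id][0], timestamp)
--         elif status in ('S', 'C'):
--             rockets_time[id] = (
--                 rockets_time[id][0] + timestamp - rockets_time[id][1],
--                 0
--             )
--
--     return [str(rockets_time[id][0]) for id in sorted(rockets_time.keys())]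
-- ===== SOURCE B (Python) =====
-- def calculate_rocket_time(log):
--     log.sort()
--     groups = {}
--     for timestamp, status, id in log:
--         groups.setdefault(id, []).append((timestamp, status))
--     result = []
--     for id in sorted(groups.keys()):
--         accumulated = 0
--         start = 0
--         for timestamp, status in groups[id]:
--             if status == 'A':
--                 start = timestamp
--             elif status in ('S', 'C'):
--                 accumulated += timestamp - start
--                 start = 0
--         result.append(str(accumulated))
--     return result
-- ===== Notes on version B (the rewrite author's own statement) =====
-- stated objective: alternative
-- what changed: Instead of threading one shared dict of (accumulated, last_start) pairs through the whole event stream, B first groups the sorted events per rocket id and then folds each rocket's own event list with a local accumulator, emitting results per sorted id.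
import Mathlib
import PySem

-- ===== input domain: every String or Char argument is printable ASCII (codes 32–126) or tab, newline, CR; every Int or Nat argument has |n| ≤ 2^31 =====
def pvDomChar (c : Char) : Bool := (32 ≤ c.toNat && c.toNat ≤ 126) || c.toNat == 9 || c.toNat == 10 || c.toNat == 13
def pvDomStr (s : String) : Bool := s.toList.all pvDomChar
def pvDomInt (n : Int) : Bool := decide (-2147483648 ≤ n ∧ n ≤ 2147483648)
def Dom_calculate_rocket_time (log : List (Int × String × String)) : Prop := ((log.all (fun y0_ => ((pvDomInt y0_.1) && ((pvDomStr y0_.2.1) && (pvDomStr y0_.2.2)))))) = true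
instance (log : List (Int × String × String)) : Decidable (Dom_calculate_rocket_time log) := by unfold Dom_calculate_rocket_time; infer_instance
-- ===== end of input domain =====

-- B replaces A's single shared dict of (accumulated, last_start) pairs by grouping the sorted
-- events per rocket id and folding each rocket's own event list with a local accumulator
-- (objective: alternative decomposition, same cost).  Both Pythons sort `log` IN PLACE, the
-- same observable mutation; the theorems below are about the return value.

-- ===== PORT A =====
-- log.sort(): Python's stable sort on (int, str, str) triples, i.e. stable insertion by the
-- strict lexicographic order below (exact for ASCII strings, where Lean's String.lt is Python's <).
def pvLexLt (a b : Int × String × String) : Bool :=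
  decide (a.1 < b.1) ||
    (a.1 == b.1 && (decide (a.2.1 < b.2.1) ||
      (a.2.1 == b.2.1 && decide (a.2.2 < b.2.2))))

def pvSortLog (log : List (Int × String × String)) : List (Int × String × String) :=
  log.foldl (fun acc x => PySem.List.insertBy pvLexLt x acc) []

-- the body of A's `for` loop (one event applied to the shared dict)
def pvStepA (d : PySem.Dict String (Int × Int)) (e : Int × String × String) :
    PySem.Dict String (Int × Int) :=
  let timestamp := e.1
  let status := e.2.1
  let id := e.2.2
  let d := if d.contains id then d else d.insert id (0, 0)
  if status == "A" then
    d.insert id ((d.getD id (0, 0)).1, timestamp)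
  else if status == "S" || status == "C" then
    d.insert id ((d.getD id (0, 0)).1 + timestamp - (d.getD id (0, 0)).2, 0)
  else d

def calculate_rocket_time (log : List (Int × String × String)) : List String :=
  let slog := pvSortLog log
  let rockets_time := slog.foldl pvStepA PySem.Dict.empty
  (PySem.List.sorted rockets_time.keys (fun x => x) false).map
    (fun id => PySem.Int.toStr (rockets_time.getD id (0, 0)).1)

-- ===== PORT B =====
-- the body of B's inner `for` loop (one of the rocket's own events applied to (accumulated, start))
def pvStepB (p : Int × Int) (ev : Int × String) : Int × Int :=
  if ev.2 == "A" then (p.1, ev.1)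
  else if ev.2 == "S" || ev.2 == "C" then (p.1 + ev.1 - p.2, 0)
  else p

def calculate_rocket_time_alt (log : List (Int × String × String)) : List String :=
  let slog := pvSortLog log
  let groups : PySem.Dict String (List (Int × String)) :=
    slog.foldl (fun d e => d.modify e.2.2 [] (· ++ [(e.1, e.2.1)])) PySem.Dict.empty
  (PySem.List.sorted groups.keys (fun x => x) false).map (fun id =>
    PySem.Int.toStr ((groups.getD id []).foldl pvStepB (0, 0)).1)

-- ===== PRECONDITION & SPEC =====
def Spec_calculate_rocket_time (log : List (Int × String × String)) (out : List String) : Prop := out = calculate_rocket_time_alt log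
instance (log : List (Int × String × String)) (out : List String) : Decidable (Spec_calculate_rocket_time log out) := by unfold Spec_calculate_rocket_time; infer_instance

-- ===== CLAIM (what is proved, stated in full; the proofs are below) =====
def Claim_equal_calculate_rocket_time : Prop := ∀ (log : List (Int × String × String)), Dom_calculate_rocket_time log → Spec_calculate_rocket_time log (calculate_rocket_time log)

-- ===== LEMMAS AND PROOFS =====

-- one A-step changes the dict's value at k exactly as one B-step when the event is k's, else not at all
theorem pvStepA_getD (d : PySem.Dict String (Int × Int)) (e : Int × String × String)
    (k : String) :
    (pvStepA d e).getD k (0, 0) =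
      if e.2.2 = k then pvStepB (d.getD k (0, 0)) (e.1, e.2.1) else d.getD k (0, 0) := by
  unfold pvStepA pvStepB
  by_cases hk : e.2.2 = k
  · subst hk
    by_cases hc : d.contains e.2.2
    · simp only [hc, if_true]
      split_ifs <;> simp_all
    · have h0 : d.getD e.2.2 (0, 0) = (0, 0) :=
        PySem.Dict.getD_of_not_contains d _ (by simpa using hc)
      simp only [hc, Bool.false_eq_true, if_false]
      split_ifs <;> simp_all
  · have hne : k ≠ e.2.2 := fun h' => hk h'.symm
    rw [if_neg hk]
    by_cases hc : d.contains e.2.2 <;>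
      simp only [hc, Bool.false_eq_true, if_true, if_false] <;>
      split_ifs <;> simp_all [PySem.Dict.getD_insert]

-- one A-step adds the event's id to the key set
theorem pvStepA_keys (d : PySem.Dict String (Int × Int)) (e : Int × String × String) :
    (pvStepA d e).keys = PySem.Set.add d.keys e.2.2 := by
  unfold pvStepA
  by_cases hc : d.contains e.2.2
  · have hm : e.2.2 ∈ d.keys := (PySem.Dict.contains_iff_mem_keys d e.2.2).mp hc
    simp only [hc, if_true]
    split_ifs <;>
      simp_all [PySem.Dict.keys_insert_of_contains, PySem.Set.add]
  · have hnc : d.contains e.2.2 = false := by simpa using hc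
    have hm : e.2.2 ∉ d.keys := fun hm =>
      absurd ((PySem.Dict.contains_iff_mem_keys d e.2.2).mpr hm) (by simp [hnc])
    have hk : (d.insert e.2.2 (0, 0)).keys = d.keys ++ [e.2.2] :=
      PySem.Dict.keys_insert_of_not_contains d _ hnc
    simp only [hc, Bool.false_eq_true, if_false]
    split_ifs <;>
      simp_all [PySem.Dict.keys_insert_of_contains, PySem.Dict.contains_insert_self,
        PySem.Set.add]

-- the value A's dict holds at key k is B's fold over k's own events
theorem pvA_getD (l : List (Int × String × String)) :
    ∀ (d : PySem.Dict String (Int × Int)) (k : String),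
      (l.foldl pvStepA d).getD k (0, 0) =
        ((l.filter (fun e => e.2.2 == k)).map (fun e => (e.1, e.2.1))).foldl pvStepB
          (d.getD k (0, 0)) := by
  induction l with
  | nil => intro d k; simp
  | cons e l ih =>
    intro d k
    simp only [List.foldl_cons, List.filter_cons]
    rw [ih]
    by_cases h : e.2.2 = k
    · simp [h, pvStepA_getD]
    · simp [h, pvStepA_getD]

-- B's grouping dict holds at key k exactly k's own events, in order
theorem pvB_getD (l : List (Int × String × String)) :
    ∀ (d : PySem.Dict String (List (Int × String))) (k : String),
      (l.foldl (fun d e => d.modify e.2.2 [] (· ++ [(e.1, e.2.1)])) d).getD k [] =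
        d.getD k [] ++ (l.filter (fun e => e.2.2 == k)).map (fun e => (e.1, e.2.1)) := by
  induction l with
  | nil => intro d k; simp
  | cons e l ih =>
    intro d k
    simp only [List.foldl_cons, List.filter_cons]
    rw [ih]
    by_cases h : e.2.2 = k
    · simp [h]
    · have hne : k ≠ e.2.2 := fun h' => h h'.symm
      simp [h, hne, PySem.Dict.getD_modify]

-- A's dict key list after the whole loop
theorem pvA_keys (l : List (Int × String × String)) :
    ∀ (d : PySem.Dict String (Int × Int)),
      (l.foldl pvStepA d).keys = PySem.Set.update d.keys (l.map (·.2.2)) := by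
  induction l with
  | nil => intro d; simp [PySem.Set.update]
  | cons e l ih =>
    intro d
    simp only [List.foldl_cons, List.map_cons]
    rw [ih, pvStepA_keys]
    simp [PySem.Set.update]

-- ===== VERDICT (by name: the statement is the Claim_ definition above) =====
theorem calculate_rocket_time_spec : Claim_equal_calculate_rocket_time := by
  intro log _
  unfold Spec_calculate_rocket_time calculate_rocket_time calculate_rocket_time_alt
  simp only []
  have hkeys :
      ((pvSortLog log).foldl pvStepA PySem.Dict.empty).keys =
        ((pvSortLog log).foldl
          (fun d e => d.modify e.2.2 [] (· ++ [(e.1, e.2.1)])) PySem.Dict.empty).keys := by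
    rw [pvA_keys, PySem.Dict.keys_foldl_modify_key]
    rfl
  rw [hkeys]
  apply List.map_congr_left
  intro id _
  rw [pvA_getD, pvB_getD]
  simp
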